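-- pv_equiv track=rewrite | github.com/jfine2358/py-dessins | py/dessins/permtools.py | rebase_cycles
-- ===== SOURCE A (Python) =====
-- import bisect
--
-- def rebase_cycles(cycles):
--     '''Rebase cycles, to use {0, 1, ..., n}, with no gaps.
--
--     Preserves relative order between indices.
--     >>> rc = rebase_cycles
--     >>> tuple(rc([[9, 3, 7], [4]]))
--     ((3, 0, 2), (1,))
--
--     '''
--
--     # Two-pass algorithm, so make sure we can reread cycles.
--     # TODO: Instead, raise exception.
--     cycles = tuple(cycles)
--     cycletype = tuple           # TODO: Allow other values.
--
--     # Create sorted list of values.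
--     values = []
--     for cyc in cycles:
--         values.extend(cyc)
--     values.sort()
--
--     # For each cycle, apply the lookup.
--     return tuple(
--         cycletype(bisect.bisect_left(values, i) for i in cyc)
--         for cyc in cycles
--     )
-- ===== SOURCE B (Python) =====
-- def rebase_cycles(cycles):
--     cycles = tuple(cycles)
--     # Argsort-and-scatter: flatten into (value, flat_position) pairs, sort once,
--     # sweep the sorted pairs assigning first-occurrence ranks directly into a
--     # flat result array, then cut it back into tuples by the cycle lengths.
--     lengths = [len(cyc) for cyc in cycles]
--     pairs = []
--     pos = 0
--     for cyc in cycles: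
--         for v in cyc:
--             pairs.append((v, pos))
--             pos += 1
--     pairs.sort()
--     out = [0] * pos
--     rank = 0
--     prev = None
--     for i, (v, p) in enumerate(pairs):
--         if i == 0 or v != prev:
--             rank = i
--         out[p] = rank
--         prev = v
--     result = []
--     rest = out
--     for n in lengths:
--         result.append(tuple(rest[:n]))
--         rest = rest[n:]
--     return tuple(result)
-- ===== Notes on version B (the rewrite author's own statement) =====
-- stated objective: alternative
-- what changed: Replaces A's per-element bisect_left binary searches into the sorted value list by an argsort-and-scatter pass: flatten to (value, position) pairs, sort them once, sweep the sorted pairs assigning first-occurrence ranks directly into a flat result array, then cut it back into the cycle shapes by the recorded lengths.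
import Mathlib
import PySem

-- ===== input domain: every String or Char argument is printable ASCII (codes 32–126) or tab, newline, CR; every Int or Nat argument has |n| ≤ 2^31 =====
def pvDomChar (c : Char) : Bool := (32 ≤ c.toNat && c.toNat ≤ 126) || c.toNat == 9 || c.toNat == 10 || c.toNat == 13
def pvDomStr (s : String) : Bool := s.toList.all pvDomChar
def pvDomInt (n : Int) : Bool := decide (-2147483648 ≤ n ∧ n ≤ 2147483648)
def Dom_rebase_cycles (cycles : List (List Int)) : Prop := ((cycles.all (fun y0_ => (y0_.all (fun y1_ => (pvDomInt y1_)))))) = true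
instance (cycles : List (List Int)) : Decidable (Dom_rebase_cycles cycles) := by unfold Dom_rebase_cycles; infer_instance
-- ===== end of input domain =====

-- B replaces A's per-element binary search by an argsort-and-scatter pass: sort
-- (value, position) pairs once, sweep them assigning first-occurrence ranks into a
-- flat array, and cut it back into the cycle shapes (objective: alternative algorithm).

-- ===== PORT A =====
-- 'cycles = tuple(cycles)' only materialises the iterable: identity on a Lean list.
def rebase_cycles (cycles : List (List Int)) : List (List Int) :=
  -- values = []; for cyc in cycles: values.extend(cyc)
  let values := cycles.foldl (fun acc cyc => acc ++ cyc) []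
  -- values.sort()
  let values := PySem.List.sorted values (fun x => x) false
  -- tuple(tuple(bisect.bisect_left(values, i) for i in cyc) for cyc in cycles)
  cycles.map (fun cyc => cyc.map (fun i => (PySem.List.bisectLeft values i : Int)))

-- ===== PORT B =====
def rebase_cycles_alt (cycles : List (List Int)) : List (List Int) :=
  -- lengths = [len(cyc) for cyc in cycles]
  let lengths := cycles.map List.length
  -- pairs = []; pos = 0; for cyc in cycles: for v in cyc: pairs.append((v, pos)); pos += 1
  let st := cycles.foldl
    (fun (st : List (Int × Nat) × Nat) cyc =>
      cyc.foldl (fun st v => (st.1 ++ [(v, st.2)], st.2 + 1)) st) ([], 0)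
  -- pairs.sort()  -- tuples compare lexicographically: key (value, position)
  let spairs := PySem.List.sorted2 st.1 (fun p => p.1) (fun p => (p.2 : Int)) false
  -- out = [0] * pos
  let out0 : List Int := List.replicate st.2 0
  -- rank = 0; prev = None
  -- for i, (v, p) in enumerate(pairs):
  --     if i == 0 or v != prev: rank = i
  --     out[p] = rank; prev = v
  -- (every p is < len(out), so List.set is exactly out[p] = rank)
  let final := (PySem.List.enumerate spairs).foldl
    (fun (s : List Int × Int × Option Int) ip =>
      let rank := if ip.1 == 0 || !(some ip.2.1 == s.2.2) then ip.1 else s.2.1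
      (s.1.set ip.2.2 rank, rank, some ip.2.1)) (out0, 0, none)
  -- result = []; rest = out
  -- for n in lengths: result.append(tuple(rest[:n])); rest = rest[n:]   (n = len(cyc) ≥ 0,
  -- so the slices are exactly take/drop)
  (lengths.foldl (fun (s : List (List Int) × List Int) n =>
      (s.1 ++ [s.2.take n], s.2.drop n)) ([], final.1)).1

-- ===== PRECONDITION & SPEC =====
def Spec_rebase_cycles (cycles : List (List Int)) (out : List (List Int)) : Prop := out = rebase_cycles_alt cycles
instance (cycles : List (List Int)) (out : List (List Int)) : Decidable (Spec_rebase_cycles cycles out) := by unfold Spec_rebase_cycles; infer_instance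

-- ===== CLAIM (what is proved, stated in full; the proofs are below) =====
def Claim_equal_rebase_cycles : Prop := ∀ (cycles : List (List Int)), Dom_rebase_cycles cycles → Spec_rebase_cycles cycles (rebase_cycles cycles)

-- ===== LEMMAS AND PROOFS =====
-- generic countP split
theorem countP_key_eq {α : Type} (f : α → Int) (S : List α) (v : Int) (k : Nat)
    (hk : k ≤ S.length)
    (hlt : ∀ i (h : i < S.length), i < k → f S[i] < v)
    (hge : ∀ i (h : i < S.length), k ≤ i → v ≤ f S[i]) :
    S.countP (fun q => decide (f q < v)) = k := by
  have h1 : (S.take k).countP (fun q => decide (f q < v)) = (S.take k).length := by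
    rw [List.countP_eq_length]
    intro y hy
    obtain ⟨i, hi, rfl⟩ := List.mem_iff_getElem.mp hy
    have hik : i < k := lt_of_lt_of_le hi (by simp [List.length_take])
    have hix : i < S.length := lt_of_lt_of_le hik hk
    rw [List.getElem_take]
    exact decide_eq_true (hlt i hix hik)
  have h2 : (S.drop k).countP (fun q => decide (f q < v)) = 0 := by
    rw [List.countP_eq_zero]
    intro y hy
    obtain ⟨i, hi, rfl⟩ := List.mem_iff_getElem.mp hy
    rw [List.getElem_drop]
    simp only [decide_eq_true_eq]
    have hi' : k + i < S.length := by rw [List.length_drop] at hi; omega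
    exact not_lt.mpr (hge (k + i) hi' (by omega))
  have hlen : (S.take k).length = k := by simp [List.length_take]; omega
  calc S.countP (fun q => decide (f q < v))
      = (S.take k).countP (fun q => decide (f q < v))
        + (S.drop k).countP (fun q => decide (f q < v)) := by
        rw [← List.countP_append, List.take_append_drop]
    _ = k := by rw [h1, h2, hlen]; omega

-- A side: bisect_left on a sorted list counts the strictly smaller elements
theorem bisectLeft_eq_countP (xs : List Int) (v : Int)
    (hs : xs.Pairwise (fun a b => a ≤ b)) :
    PySem.List.bisectLeft xs v = xs.countP (fun y => decide (y < v)) := by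
  obtain ⟨hle, hlt, hge⟩ := PySem.List.bisectLeft_spec xs v hs
  exact (countP_key_eq (fun y => y) xs v _ hle hlt hge).symm

-- B side: the nested append loop builds the (value, flat position) pairs
theorem build_inner (cyc : List Int) (a : List (Int × Nat)) (n : Nat) :
    cyc.foldl (fun st v => (st.1 ++ [(v, st.2)], st.2 + 1)) (a, n)
      = (a ++ cyc.zipIdx n, n + cyc.length) := by
  induction cyc generalizing a n with
  | nil => simp
  | cons x t ih =>
    simp only [List.foldl_cons, ih, List.zipIdx_cons, List.length_cons]
    rw [Prod.mk.injEq]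
    exact ⟨by simp, by omega⟩

theorem build_pairs (cycles : List (List Int)) (a : List (Int × Nat)) (n : Nat) :
    cycles.foldl
        (fun (st : List (Int × Nat) × Nat) cyc =>
          cyc.foldl (fun st v => (st.1 ++ [(v, st.2)], st.2 + 1)) st) (a, n)
      = (a ++ (cycles.flatMap (fun c => c)).zipIdx n,
         n + (cycles.flatMap (fun c => c)).length) := by
  induction cycles generalizing a n with
  | nil => simp
  | cons c t ih =>
    simp only [List.foldl_cons, build_inner, ih, List.flatMap_cons, List.zipIdx_append,
      List.length_append]
    rw [Prod.mk.injEq]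
    exact ⟨by simp, by omega⟩

theorem zipIdx_map_fst {α : Type} (l : List α) (n : Nat) :
    (l.zipIdx n).map Prod.fst = l := by
  induction l generalizing n with
  | nil => simp
  | cons x t ih => simp [List.zipIdx_cons, ih]

theorem zipIdx_map_snd {α : Type} (l : List α) (n : Nat) :
    (l.zipIdx n).map Prod.snd = List.range' n l.length := by
  induction l generalizing n with
  | nil => simp
  | cons x t ih => simp [List.zipIdx_cons, ih, List.range'_succ]

-- Python's tuple sort keeps the result nondecreasing in the first component
theorem insertBy_lex_pairwise_fst (x : Int × Nat) (ys : List (Int × Nat))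
    (h : ys.Pairwise (fun a b => a.1 ≤ b.1)) :
    (PySem.List.insertBy
        (fun a b => decide (a.1 < b.1) || (!decide (b.1 < a.1) && decide ((a.2 : Int) < (b.2 : Int))))
        x ys).Pairwise (fun a b => a.1 ≤ b.1) := by
  induction ys with
  | nil => simp [PySem.List.insertBy]
  | cons y t ih =>
    rw [List.pairwise_cons] at h
    obtain ⟨hy, ht⟩ := h
    rw [PySem.List.insertBy.eq_2]
    split_ifs with hb
    · have hxy : x.1 ≤ y.1 := by
        simp only [Bool.or_eq_true, Bool.and_eq_true, Bool.not_eq_true', decide_eq_true_eq,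
          decide_eq_false_iff_not] at hb
        rcases hb with h1 | ⟨h1, _⟩
        · exact le_of_lt h1
        · exact le_of_not_gt h1
      refine List.pairwise_cons.mpr ⟨?_, List.pairwise_cons.mpr ⟨hy, ht⟩⟩
      intro a ha
      rcases List.mem_cons.mp ha with rfl | ha
      · exact hxy
      · exact le_trans hxy (hy a ha)
    · have hyx : y.1 ≤ x.1 := by
        simp only [Bool.or_eq_true, Bool.and_eq_true, Bool.not_eq_true', decide_eq_true_eq,
          decide_eq_false_iff_not, not_or, not_and] at hb
        obtain ⟨h1, _⟩ := hb
        exact le_of_not_gt h1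
      refine List.pairwise_cons.mpr ⟨?_, ih ht⟩
      intro a ha
      rcases (PySem.List.mem_insertBy _ _ _ _).mp ha with rfl | ha
      · exact hyx
      · exact hy a ha
theorem foldl_insertBy_lex_pairwise (l acc : List (Int × Nat))
    (hacc : acc.Pairwise (fun a b => a.1 ≤ b.1)) :
    (l.foldl (fun acc x => PySem.List.insertBy
        (fun a b => decide (a.1 < b.1) || (!decide (b.1 < a.1) && decide ((a.2 : Int) < (b.2 : Int))))
        x acc) acc).Pairwise (fun a b => a.1 ≤ b.1) := by
  induction l generalizing acc with
  | nil => exact hacc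
  | cons x t ih => exact ih _ (insertBy_lex_pairwise_fst x acc hacc)

theorem sorted2_pairwise_fst (xs : List (Int × Nat)) :
    (PySem.List.sorted2 xs (fun p => p.1) (fun p => (p.2 : Int)) false).Pairwise
      (fun a b => a.1 ≤ b.1) :=
  foldl_insertBy_lex_pairwise xs [] (List.Pairwise.nil)

theorem scatter_getElem? (L : List (Int × Nat)) (g : Int → Int) (o : List Int) (k : Nat)
    (hnd : (L.map Prod.snd).Nodup) (hrange : ∀ q ∈ L, q.2 < o.length) :
    (L.foldl (fun o q => o.set q.2 (g q.1)) o)[k]? =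
      match L.find? (fun q => q.2 == k) with
      | some q => some (g q.1)
      | none => o[k]? := by
  induction L generalizing o with
  | nil => simp
  | cons q t ih =>
    simp only [List.map_cons, List.nodup_cons] at hnd
    obtain ⟨hq, hnd⟩ := hnd
    simp only [List.foldl_cons, List.find?_cons]
    by_cases h : q.2 = k
    · subst h
      simp only [beq_self_eq_true]
      have hfind : t.find? (fun p => p.2 == q.2) = none := by
        rw [List.find?_eq_none]
        intro p hp h
        exact hq ((beq_iff_eq.mp h) ▸ List.mem_map_of_mem hp)
      rw [ih _ hnd (fun p hp => by rw [List.length_set]; exact hrange p (List.mem_cons_of_mem _ hp))]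
      rw [hfind]
      simp [hrange q (List.mem_cons_self)]
    · have hbeq : (q.2 == k) = false := beq_eq_false_iff_ne.mpr h
      rw [hbeq]
      rw [ih _ hnd (fun p hp => by rw [List.length_set]; exact hrange p (List.mem_cons_of_mem _ hp))]
      cases hf : t.find? (fun p => p.2 == k) with
      | some p => rfl
      | none => simp [h]

theorem slices_go (f : Int → Int) (cycles : List (List Int)) (acc : List (List Int)) :
    ((cycles.map List.length).foldl (fun (s : List (List Int) × List Int) n =>
        (s.1 ++ [s.2.take n], s.2.drop n))
      (acc, (cycles.flatMap (fun c => c)).map f)).1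
      = acc ++ cycles.map (fun c => c.map f) := by
  induction cycles generalizing acc with
  | nil => simp
  | cons c t ih =>
    simp only [List.map_cons, List.foldl_cons, List.flatMap_cons, List.map_append]
    have h1 : (c.map f ++ (t.flatMap (fun c => c)).map f).take c.length = c.map f := by
      have := List.take_left (l₁ := c.map f) (l₂ := (t.flatMap (fun c => c)).map f)
      rwa [List.length_map] at this
    have h2 : (c.map f ++ (t.flatMap (fun c => c)).map f).drop c.length
        = (t.flatMap (fun c => c)).map f := by
      have := List.drop_left (l₁ := c.map f) (l₂ := (t.flatMap (fun c => c)).map f)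
      rwa [List.length_map] at this
    rw [h1, h2, ih]
    simp

-- the sweep loop computes, at every written cell, the count of strictly smaller values
theorem sweep_go (S : List (Int × Nat))
    (hmono : ∀ i j (_ : i < S.length) (hj : j < S.length), i ≤ j → S[i].1 ≤ S[j].1)
    (l pre : List (Int × Nat)) (hS : S = pre ++ l) (o : List Int) (rank : Int)
    (prev : Option Int) (hprev : prev = pre.getLast?.map (fun q => q.1))
    (hrank : ∀ pv, prev = some pv → rank = (S.countP (fun q => decide (q.1 < pv)) : Int)) :
    ((PySem.List.enumerate l (pre.length : Int)).foldl
       (fun (s : List Int × Int × Option Int) ip =>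
         let rank := if ip.1 == 0 || !(some ip.2.1 == s.2.2) then ip.1 else s.2.1
         (s.1.set ip.2.2 rank, rank, some ip.2.1)) (o, rank, prev)).1
      = l.foldl (fun o q => o.set q.2 ((S.countP (fun p => decide (p.1 < q.1)) : Int))) o := by
  induction l generalizing pre o rank prev with
  | nil => rw [PySem.List.enumerate_nil]; rfl
  | cons q t ih =>
    rw [PySem.List.enumerate_cons]
    simp only [List.foldl_cons]
    have hkS : pre.length < S.length := by rw [hS]; simp
    have hSk : S[pre.length]'hkS = q := by
      subst hS
      rw [List.getElem_append_right (le_refl _)]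
      simp
    have hr : (if ((pre.length : Int) == 0 || !(some q.1 == prev)) then (pre.length : Int)
        else rank) = (S.countP (fun p => decide (p.1 < q.1)) : Int) := by
      have hcount : (∀ j (h : j < S.length), j < pre.length → S[j].1 < q.1) →
          S.countP (fun p => decide (p.1 < q.1)) = pre.length := by
        intro hlt
        exact countP_key_eq (fun p => p.1) S q.1 pre.length (le_of_lt hkS) hlt
          (fun i hi hki => by
            have := hmono pre.length i hkS hi hki
            rw [hSk] at this; exact this)
      by_cases h0 : pre.length = 0
      · have : S.countP (fun p => decide (p.1 < q.1)) = pre.length :=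
          hcount (fun j hj hjk => absurd hjk (by omega))
        simp [h0, this]
      · have hne : ((pre.length : Int) == 0) = false := by
          simp only [beq_eq_false_iff_ne, ne_eq, Int.natCast_eq_zero]; exact h0
        have hpre_ne : pre ≠ [] := List.ne_nil_of_length_pos (Nat.pos_of_ne_zero h0)
        have hlast : pre.getLast? = some (pre.getLast hpre_ne) :=
          List.getLast?_eq_some_getLast hpre_ne
        set pv := (pre.getLast hpre_ne).1 with hpv
        have hprev' : prev = some pv := by rw [hprev, hlast]; rfl
        have hk1 : pre.length - 1 < S.length := by omega
        have hSk1 : S[pre.length - 1]'hk1 = pre.getLast hpre_ne := by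
          subst hS
          rw [List.getElem_append_left (by omega), List.getLast_eq_getElem]
        by_cases hv : q.1 = pv
        · have hbe : (some q.1 == prev) = true := by rw [hprev', hv]; simp
          rw [hne, hbe]
          simp only [Bool.not_true, Bool.or_false, Bool.false_eq_true, if_false]
          rw [hrank pv hprev', hv]
        · have hbe : (some q.1 == prev) = false := by
            rw [hprev']
            simp only [beq_eq_false_iff_ne, ne_eq, Option.some.injEq]
            exact hv
          rw [hne, hbe]
          simp only [Bool.not_false, Bool.or_true, if_true]
          have hpvq : pv < q.1 := by
            have hle : pv ≤ q.1 := by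
              have := hmono (pre.length - 1) pre.length hk1 hkS (by omega)
              rw [hSk, hSk1] at this
              exact this
            rcases lt_or_eq_of_le hle with h | h
            · exact h
            · exact absurd h.symm hv
          have : S.countP (fun p => decide (p.1 < q.1)) = pre.length := by
            apply hcount
            intro j hj hjk
            have hle2 : S[j].1 ≤ (S[pre.length - 1]'hk1).1 :=
              hmono j (pre.length - 1) hj hk1 (by omega)
            rw [hSk1] at hle2
            exact lt_of_le_of_lt hle2 hpvq
          rw [this]
    rw [hr]
    have harith : (pre.length : Int) + 1 = (((pre ++ [q]).length : Nat) : Int) := by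
      simp
    rw [harith]
    exact ih (pre ++ [q]) (by rw [hS]; simp) _ _ _
      (by rw [List.getLast?_concat]; rfl)
      (fun pv hpv => by cases hpv; rfl)

theorem alt_eq (cycles : List (List Int)) :
    rebase_cycles_alt cycles = cycles.map (fun c => c.map (fun v =>
      (((cycles.flatMap (fun c => c)).countP (fun y => decide (y < v)) : Nat) : Int))) := by
  unfold rebase_cycles_alt
  rw [build_pairs]
  simp only [List.nil_append, Nat.zero_add]
  set flat := cycles.flatMap (fun c => c) with hflat
  set spairs := PySem.List.sorted2 (flat.zipIdx 0) (fun p => p.1) (fun p => (p.2 : Int)) false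
    with hspairs
  have hperm : spairs.Perm (flat.zipIdx 0) :=
    PySem.List.sorted2_perm (flat.zipIdx 0) (fun p => p.1) (fun p => (p.2 : Int)) false
  have hpw := sorted2_pairwise_fst (flat.zipIdx 0)
  rw [← hspairs] at hpw
  have hmono : ∀ i j (_ : i < spairs.length) (hj : j < spairs.length), i ≤ j →
      spairs[i].1 ≤ spairs[j].1 := by
    intro i j hi hj hij
    rcases Nat.lt_or_ge i j with h | h
    · exact List.pairwise_iff_getElem.mp hpw i j hi hj h
    · have : i = j := by omega
      subst this; exact le_refl _
  have hsweep := sweep_go spairs hmono spairs [] rfl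
    (List.replicate flat.length 0) 0 none rfl (fun pv h => by cases h)
  simp only [List.length_nil, Nat.cast_zero] at hsweep
  rw [hsweep]
  have hmem_zip : ∀ q ∈ spairs, flat[q.2]? = some q.1 := by
    intro q hq
    have hqz : q ∈ flat.zipIdx 0 := hperm.mem_iff.mp hq
    have : (q.1, q.2) ∈ flat.zipIdx 0 := by simpa using hqz
    exact List.mk_mem_zipIdx_iff_getElem?.mp this
  have hrange : ∀ q ∈ spairs, q.2 < (List.replicate flat.length (0 : Int)).length := by
    intro q hq
    rw [List.length_replicate]
    exact List.getElem?_eq_some_iff.mp (hmem_zip q hq) |>.1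
  have hnd : (spairs.map Prod.snd).Nodup := by
    have hp2 : (spairs.map Prod.snd).Perm ((flat.zipIdx 0).map Prod.snd) := hperm.map _
    rw [zipIdx_map_snd] at hp2
    exact hp2.nodup_iff.mpr (List.nodup_range' 1)
  have hcnt : ∀ v : Int, spairs.countP (fun p => decide (p.1 < v))
      = flat.countP (fun y => decide (y < v)) := by
    intro v
    rw [hperm.countP_eq]
    have := List.countP_map (p := fun y => decide (y < v)) (f := Prod.fst) (l := flat.zipIdx 0)
    rw [zipIdx_map_fst] at this
    exact this.symm
  have hout : spairs.foldl (fun o q => o.set q.2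
        ((spairs.countP (fun p => decide (p.1 < q.1)) : Nat) : Int))
        (List.replicate flat.length 0)
      = flat.map (fun v => ((flat.countP (fun y => decide (y < v)) : Nat) : Int)) := by
    apply List.ext_getElem?
    intro k
    rw [scatter_getElem? spairs (fun v => ((spairs.countP (fun p => decide (p.1 < v)) : Nat) : Int))
      _ k hnd hrange]
    by_cases hk : k < flat.length
    · have hmem : (flat[k]'hk, k) ∈ spairs := by
        rw [hperm.mem_iff]
        exact List.mk_mem_zipIdx_iff_getElem?.mpr (List.getElem?_eq_getElem hk)
      have hsome : (spairs.find? (fun q => q.2 == k)).isSome := by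
        rw [List.find?_isSome]
        exact ⟨_, hmem, by simp⟩
      obtain ⟨p, hp⟩ := Option.isSome_iff_exists.mp hsome
      have hpk : p.2 = k := by simpa using List.find?_some hp
      have hpv : p.1 = flat[k]'hk := by
        have := hmem_zip p (List.mem_of_find?_eq_some hp)
        rw [hpk, List.getElem?_eq_getElem hk] at this
        exact (Option.some.inj this).symm
      rw [hp]
      simp only [hpv, hcnt]
      rw [List.getElem?_map, List.getElem?_eq_getElem hk]
      rfl
    · have hnone : spairs.find? (fun q => q.2 == k) = none := by
        rw [List.find?_eq_none]
        intro q hq h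
        have := hrange q hq
        rw [List.length_replicate] at this
        rw [beq_iff_eq.mp h] at this
        omega
      rw [hnone]
      rw [List.getElem?_eq_none (by rw [List.length_replicate]; omega),
        List.getElem?_eq_none (by rw [List.length_map]; omega)]
  rw [hout]
  rw [slices_go (fun v => ((flat.countP (fun y => decide (y < v)) : Nat) : Int)) cycles []]
  simp

theorem a_eq (cycles : List (List Int)) :
    rebase_cycles cycles = cycles.map (fun c => c.map (fun v =>
      (((cycles.flatMap (fun c => c)).countP (fun y => decide (y < v)) : Nat) : Int))) := by
  unfold rebase_cycles
  have hflat : cycles.foldl (fun acc cyc => acc ++ cyc) [] = cycles.flatMap (fun c => c) := by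
    simpa using PySem.List.foldl_append_eq_flatMap (fun c => c) cycles []
  rw [hflat]
  set flat := cycles.flatMap (fun c => c) with hf
  have hs : (PySem.List.sorted flat (fun x => x) false).Pairwise (fun a b => a ≤ b) :=
    PySem.List.sorted_pairwise flat (fun x => x)
  apply List.map_congr_left
  intro cyc _
  apply List.map_congr_left
  intro v _
  rw [bisectLeft_eq_countP _ v hs]
  rw [(PySem.List.sorted_perm flat (fun x => x) false).countP_eq]

-- ===== VERDICT (by name: the statement is the Claim_ definition above) =====
theorem rebase_cycles_spec : Claim_equal_rebase_cycles := by
  intro cycles _hdom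
  unfold Spec_rebase_cycles
  rw [a_eq, alt_eq]
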